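-- pv_equiv track=rewrite | github.com/karimgsk6-debug/New-AI-sales-call-assistant | Test V14 per brans/SP/ TestV14 per brand/TestV17 per brand-SP-Persona.py | pick_visual_keywords
-- ===== SOURCE A (Python) =====
-- def pick_visual_keywords(ai_text: str, selected_barriers: list[str]) -> set[str]:
--     """
--     Collect visual keywords from AI text and user-selected barriers.
--     """
--     text = (ai_text or "").lower()
--     keys = set()
--
--     # From AI response content
--     for kw in ["cost", "efficacy", "safety", "adherence"]:
--         if kw in text:
--             keys.add(kw)
--
--     # From barriers
--     for b in selected_barriers:
--         b_low = b.lower()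
--         if "cost" in b_low:
--             keys.add("cost")
--         if "efficacy" in b_low:
--             keys.add("efficacy")
--         if "safety" in b_low:
--             keys.add("safety")
--         if "adherence" in b_low:
--             keys.add("adherence")
--
--     return keys
-- ===== SOURCE B (Python) =====
-- def pick_visual_keywords(ai_text: str, selected_barriers: list[str]) -> set[str]:
--     """
--     Collect visual keywords from AI text and user-selected barriers.
--
--     Worklist algorithm: keep a shrinking list of keywords still to find;
--     each source removes the keywords it contains, and the scan stops as
--     soon as every keyword has been found.
--     """
--     sources = [(ai_text or "").lower()] + [b.lower() for b in selected_barriers]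
--     remaining = ["cost", "efficacy", "safety", "adherence"]
--     found = []
--     for s in sources:
--         if not remaining:
--             break
--         hits = [kw for kw in remaining if kw in s]
--         found += hits
--         remaining = [kw for kw in remaining if kw not in hits]
--     return set(found)
-- ===== Notes on version B (the rewrite author's own statement) =====
-- stated objective: alternative
-- what changed: Replaces A's grow-only set with repeated membership tests of all four keywords against every source by a shrinking worklist: each source removes the keywords it contains from the remaining list, so a keyword is tested only until first found and the scan stops early once the worklist is empty.
import Mathlib
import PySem

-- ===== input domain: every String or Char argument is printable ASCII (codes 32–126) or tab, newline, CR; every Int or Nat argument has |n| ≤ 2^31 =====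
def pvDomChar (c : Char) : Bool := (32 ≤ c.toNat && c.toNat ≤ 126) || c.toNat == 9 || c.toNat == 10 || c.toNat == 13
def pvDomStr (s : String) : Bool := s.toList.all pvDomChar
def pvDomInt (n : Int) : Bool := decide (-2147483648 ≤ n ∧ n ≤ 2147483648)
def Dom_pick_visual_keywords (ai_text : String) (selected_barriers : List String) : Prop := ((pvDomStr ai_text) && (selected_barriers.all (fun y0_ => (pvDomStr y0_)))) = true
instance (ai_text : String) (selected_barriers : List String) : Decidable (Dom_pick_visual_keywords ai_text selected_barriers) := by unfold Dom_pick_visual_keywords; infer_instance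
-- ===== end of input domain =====

-- B replaces A's grow-only set (all four keywords tested against every source) by a
-- shrinking worklist of keywords still to find, with an early stop once it is empty;
-- same cost, a genuinely different traversal state ("alternative").

-- ===== PORT A =====
def pick_visual_keywords (ai_text : String) (selected_barriers : List String) : List String :=
  -- text = (ai_text or "").lower()   (ai_text is falsy exactly when it is "")
  let text := PySem.Str.lower (if ai_text == "" then "" else ai_text)
  let keys : PySem.Set String := PySem.Set.empty
  let keys := ["cost", "efficacy", "safety", "adherence"].foldl
    (fun k kw => if PySem.Str.isIn kw text then PySem.Set.add k kw else k) keys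
  let keys := selected_barriers.foldl (fun k b =>
    let b_low := PySem.Str.lower b
    let k := if PySem.Str.isIn "cost" b_low then PySem.Set.add k "cost" else k
    let k := if PySem.Str.isIn "efficacy" b_low then PySem.Set.add k "efficacy" else k
    let k := if PySem.Str.isIn "safety" b_low then PySem.Set.add k "safety" else k
    let k := if PySem.Str.isIn "adherence" b_low then PySem.Set.add k "adherence" else k
    k) keys
  keys

-- ===== PORT B =====
-- the for-loop over sources with state (found, remaining) and the 'break' on an
-- empty worklist, as structural recursion over the source list
def pvkLoop (found remaining : List String) : List String → List String
  | [] => found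
  | s :: rest =>
    if remaining.isEmpty then found
    else
      let hits := remaining.filter (fun kw => PySem.Str.isIn kw s)
      pvkLoop (found ++ hits) (remaining.filter (fun kw => !(hits.contains kw))) rest

def pick_visual_keywords_alt (ai_text : String) (selected_barriers : List String) : List String :=
  let sources := PySem.Str.lower (if ai_text == "" then "" else ai_text)
    :: selected_barriers.map PySem.Str.lower
  PySem.Set.ofList (pvkLoop [] ["cost", "efficacy", "safety", "adherence"] sources)

-- ===== PRECONDITION & SPEC =====
def Spec_pick_visual_keywords (ai_text : String) (selected_barriers : List String) (out : List String) : Prop := out = pick_visual_keywords_alt ai_text selected_barriers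
instance (ai_text : String) (selected_barriers : List String) (out : List String) : Decidable (Spec_pick_visual_keywords ai_text selected_barriers out) := by unfold Spec_pick_visual_keywords; infer_instance

-- ===== CLAIM (what is proved, stated in full; the proofs are below) =====
def Claim_equal_pick_visual_keywords : Prop := ∀ (ai_text : String) (selected_barriers : List String), Dom_pick_visual_keywords ai_text selected_barriers → Spec_pick_visual_keywords ai_text selected_barriers (pick_visual_keywords ai_text selected_barriers)

-- ===== LEMMAS AND PROOFS =====

-- folding Set.add of a duplicate-free list appends exactly its members not already present
theorem foldl_add_eq_append (l : List String) (hnd : l.Nodup) (acc : List String) :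
    l.foldl PySem.Set.add acc = acc ++ l.filter (fun x => !acc.contains x) := by
  induction l generalizing acc with
  | nil => simp
  | cons x l ih =>
    rcases List.nodup_cons.mp hnd with ⟨hx, hnd'⟩
    by_cases h : x ∈ acc
    · simp [PySem.Set.add, h, ih hnd']
    · rw [List.foldl_cons]
      simp only [PySem.Set.add, List.contains_iff_mem, if_neg h]
      rw [ih hnd']
      simp [h]
      apply List.filter_congr
      intro y hy
      have hyx : y ≠ x := fun e => hx (e ▸ hy)
      simp [hyx]

-- an empty worklist stops the loop at once
theorem pvkLoop_empty (acc : List String) (srcs : List String) :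
    pvkLoop acc [] srcs = acc := by
  cases srcs <;> simp [pvkLoop]

-- the guarded keyword loop is the fold of Set.add over the filtered keyword list
theorem keyword_loop_eq (kws : List String) (s : String) (k : PySem.Set String) :
    kws.foldl (fun k kw => if PySem.Str.isIn kw s then PySem.Set.add k kw else k) k
      = (kws.filter (fun kw => PySem.Str.isIn kw s)).foldl PySem.Set.add k :=
  PySem.List.foldl_if_eq_foldl_filter _ _ _ _

-- main invariant: A's source-by-source fold with the full keyword list equals B's
-- worklist recursion when the worklist is exactly the keywords not yet collected
theorem loop_eq (kws : List String) (hnd : kws.Nodup) (srcs : List String) :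
    ∀ acc : List String,
    srcs.foldl (fun k s =>
        (kws.filter (fun kw => PySem.Str.isIn kw s)).foldl PySem.Set.add k) acc
      = pvkLoop acc (kws.filter (fun kw => !acc.contains kw)) srcs := by
  induction srcs with
  | nil => intro acc; rfl
  | cons s rest ih =>
    intro acc
    by_cases hemp : (kws.filter (fun kw => !acc.contains kw)).isEmpty
    · -- worklist empty: B stops; A's fold adds nothing on any later source
      have h0 := List.isEmpty_iff.mp hemp
      have hall : ∀ kw ∈ kws, kw ∈ acc := by
        intro kw hkw
        by_contra hmem
        have hin : kw ∈ kws.filter (fun kw => !acc.contains kw) :=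
          List.mem_filter.mpr ⟨hkw, by simp [hmem]⟩
        rw [h0] at hin
        exact List.not_mem_nil hin
      have hstep : ∀ t : String,
          (kws.filter (fun kw => PySem.Str.isIn kw t)).foldl PySem.Set.add acc = acc := by
        intro t
        rw [foldl_add_eq_append _ (hnd.filter _) acc]
        have hnil : (kws.filter (fun kw => PySem.Str.isIn kw t)).filter
            (fun x => !acc.contains x) = [] := by
          apply List.filter_eq_nil_iff.mpr
          intro x hxmem
          simp [hall x (List.mem_of_mem_filter hxmem)]
        rw [hnil, List.append_nil]
      rw [List.foldl_cons, hstep s, ih acc, h0, pvkLoop_empty, pvkLoop_empty]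
    · -- worklist nonempty: one step, then the invariant for acc ++ hits
      have hsplit : ∀ h : List String,
          kws.filter (fun kw => !(acc ++ h).contains kw)
            = (kws.filter (fun kw => !acc.contains kw)).filter
                (fun kw => !(h.contains kw)) := by
        intro h
        rw [List.filter_filter]
        apply List.filter_congr
        intro kw _
        by_cases h1 : kw ∈ acc <;> by_cases h2 : kw ∈ h <;>
          simp [h1, h2, List.mem_append]
      rw [List.foldl_cons, foldl_add_eq_append _ (hnd.filter _) acc,
        List.filter_comm, ih, hsplit]
      simp only [pvkLoop]
      rw [if_neg hemp]

-- a duplicate-free list is already a set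
theorem ofList_of_nodup (l : List String) (hnd : l.Nodup) :
    PySem.Set.ofList l = l := by
  rw [PySem.Set.ofList_eq_foldl, foldl_add_eq_append l hnd []]
  simp

-- the result of A's fold (= B's loop value) is duplicate-free
theorem nodup_foldl_add (l : List String) (hnd : l.Nodup) (acc : List String)
    (hacc : acc.Nodup) : (l.foldl PySem.Set.add acc).Nodup := by
  rw [foldl_add_eq_append l hnd acc]
  apply List.Nodup.append hacc (hnd.filter _)
  intro x hx hx'
  have hmem := List.of_mem_filter hx'
  simp [hx] at hmem

-- the source-by-source fold keeps the accumulated set duplicate-free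
theorem nodup_sources_fold (kws : List String) (hnd : kws.Nodup) (srcs : List String)
    (acc : List String) (hacc : acc.Nodup) :
    (srcs.foldl (fun k s =>
        (kws.filter (fun kw => PySem.Str.isIn kw s)).foldl PySem.Set.add k) acc).Nodup := by
  induction srcs generalizing acc with
  | nil => exact hacc
  | cons s rest ih => exact ih _ (nodup_foldl_add _ (hnd.filter _) _ hacc)

-- ===== VERDICT (by name: the statement is the Claim_ definition above) =====
theorem pick_visual_keywords_spec : Claim_equal_pick_visual_keywords := by
  intro ai_text selected_barriers _
  show pick_visual_keywords ai_text selected_barriers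
      = pick_visual_keywords_alt ai_text selected_barriers
  unfold pick_visual_keywords pick_visual_keywords_alt
  have hnd : (["cost", "efficacy", "safety", "adherence"] : List String).Nodup := by decide
  -- A as one fold over the source list (text first, then the lowered barriers)
  have hA : ∀ acc : PySem.Set String, ∀ bs : List String,
      bs.foldl (fun k b =>
        let b_low := PySem.Str.lower b
        let k := if PySem.Str.isIn "cost" b_low then PySem.Set.add k "cost" else k
        let k := if PySem.Str.isIn "efficacy" b_low then PySem.Set.add k "efficacy" else k
        let k := if PySem.Str.isIn "safety" b_low then PySem.Set.add k "safety" else k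
        let k := if PySem.Str.isIn "adherence" b_low then PySem.Set.add k "adherence" else k
        k) acc
      = (bs.map PySem.Str.lower).foldl (fun k s =>
          ((["cost", "efficacy", "safety", "adherence"] : List String).filter
            (fun kw => PySem.Str.isIn kw s)).foldl PySem.Set.add k) acc := by
    intro acc bs
    rw [List.foldl_map]
    apply PySem.List.foldl_congr_mem
    intro k b _
    rw [← keyword_loop_eq]
    rfl
  simp only [hA, keyword_loop_eq]
  have hsrcs := loop_eq _ hnd
    (PySem.Str.lower (if ai_text == "" then "" else ai_text)
      :: selected_barriers.map PySem.Str.lower) PySem.Set.empty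
  have hnodup := nodup_sources_fold _ hnd
    (PySem.Str.lower (if ai_text == "" then "" else ai_text)
      :: selected_barriers.map PySem.Str.lower) PySem.Set.empty (by simp [PySem.Set.empty])
  rw [hsrcs] at hnodup
  rw [List.foldl_cons] at hsrcs
  simp only [PySem.Set.empty, List.contains_nil, Bool.not_false, List.filter_true]
    at hsrcs hnodup
  rw [ofList_of_nodup _ hnodup]
  exact hsrcs
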